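-- pv_equiv track=rewrite | github.com/pdemz/si420project | ConnectFour.py | evalHelper
-- ===== SOURCE A (Python) =====
-- def evalHelper(evalRack, row, column, total, stars, currColor, initColor, oppColor, direction ):
--
--     if total == 4 and currColor == initColor:
--         return 1000
--
--     #We went out of bounds or hit a red piece
--     if row < 0 or row > 5 or column < 0 or column > 6 or evalRack[row][column] == oppColor or (currColor == "STAR" and evalRack[row][column] == initColor):
--         if(stars + total > 3):
--             return total*total
--         else:
--             return 0
--
--     if evalRack[row][column] == '*':
--         currColor = "STAR";
--
--     #Keep trucking - check which direction to go in starting with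
--     #north and going clockwise numerically
--     if direction == 0:
--         row += 1
--     elif direction == 1:
--         row += 1
--         column += 1
--     elif direction == 2:
--         column += 1
--     elif direction == 3:
--         row -= 1
--         column += 1
--     elif direction == 4:
--         row -= 1
--     elif direction == 5:
--         row -= 1
--         column -= 1
--     elif direction == 6:
--         column -= 1
--     elif direction == 7:
--         row += 1
--         column -= 1
--
--     if currColor == "STAR":
--         return evalHelper(evalRack, row, column, total, stars+1, currColor, initColor, oppColor, direction)
--     elif currColor == initColor:
--         return evalHelper(evalRack, row, column, total+1, stars, currColor, initColor, oppColor, direction)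
-- ===== SOURCE B (Python) =====
-- # State-machine decomposition: a pure _step computes either the final score or
-- # the next state; evalHelper looks up the step offset once and drives the loop.
--
-- DELTAS = ((1, 0), (1, 1), (0, 1), (-1, 1), (-1, 0), (-1, -1), (0, -1), (1, -1))
--
--
-- def _step(evalRack, st, initColor, oppColor, dr, dc):
--     """Return (done, next_state): done is the final score (or None), next_state
--     is the state to continue from (or None)."""
--     row, column, total, stars, curr = st
--     if total == 4 and curr == initColor:
--         return 1000, None
--     if not (0 <= row <= 5 and 0 <= column <= 6) or evalRack[row][column] == oppColor \
--             or (curr == "STAR" and evalRack[row][column] == initColor):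
--         return (total * total if stars + total > 3 else 0), None
--     if evalRack[row][column] == '*':
--         curr = "STAR"
--     if curr == "STAR":
--         return None, (row + dr, column + dc, total, stars + 1, curr)
--     if curr == initColor:
--         return None, (row + dr, column + dc, total + 1, stars, curr)
--     return None, None  # A falls through returning None here
--
--
-- def evalHelper(evalRack, row, column, total, stars, currColor, initColor, oppColor, direction):
--     dr, dc = DELTAS[direction] if 0 <= direction < 8 else (0, 0)
--     st = (row, column, total, stars, currColor)
--     while st is not None:
--         done, st = _step(evalRack, st, initColor, oppColor, dr, dc)
--         if done is not None:
--             return done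
--     return None
-- ===== Notes on version B (the rewrite author's own statement) =====
-- stated objective: alternative
-- what changed: Replaces A's self-recursion with a nine-way elif chain by a state-machine decomposition: a pure one-step transition function (final score or next state) driven by a while-loop, with the step offset looked up once in a tuple table.
-- outside the precondition, e.g. on evalHelper([['x']], 0, 0, 0, 0, 'y', 'y', 'x', 2): A returns 0, B returns 0
import Mathlib
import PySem

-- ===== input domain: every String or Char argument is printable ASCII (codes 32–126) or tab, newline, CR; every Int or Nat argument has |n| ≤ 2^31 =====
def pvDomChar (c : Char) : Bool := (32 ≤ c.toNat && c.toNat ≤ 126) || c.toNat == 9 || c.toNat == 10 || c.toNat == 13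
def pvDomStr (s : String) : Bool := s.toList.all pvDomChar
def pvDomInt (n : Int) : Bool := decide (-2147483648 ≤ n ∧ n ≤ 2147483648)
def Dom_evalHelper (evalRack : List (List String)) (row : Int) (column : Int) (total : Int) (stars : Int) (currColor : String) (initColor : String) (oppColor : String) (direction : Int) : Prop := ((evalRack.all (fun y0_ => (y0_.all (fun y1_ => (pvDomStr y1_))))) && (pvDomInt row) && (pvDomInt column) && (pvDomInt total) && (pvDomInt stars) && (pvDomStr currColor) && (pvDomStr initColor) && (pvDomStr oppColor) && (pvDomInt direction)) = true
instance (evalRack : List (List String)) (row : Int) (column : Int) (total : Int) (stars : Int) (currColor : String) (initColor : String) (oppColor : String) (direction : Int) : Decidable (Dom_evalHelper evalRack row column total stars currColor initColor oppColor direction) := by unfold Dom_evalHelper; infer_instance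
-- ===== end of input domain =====

-- B replaces A's self-recursion and nine-way branch chain by a state-machine
-- decomposition: a pure one-step transition function driven by a loop, with the
-- step offset looked up once in a tuple table (objective: alternative).

-- ===== PORT A =====
-- A's 8-way direction chain (Python's inline elif chain, as a named helper).
def stepA (direction row column : Int) : Int × Int :=
  if direction == 0 then (row + 1, column)
  else if direction == 1 then (row + 1, column + 1)
  else if direction == 2 then (row, column + 1)
  else if direction == 3 then (row - 1, column + 1)
  else if direction == 4 then (row - 1, column)
  else if direction == 5 then (row - 1, column - 1)
  else if direction == 6 then (row, column - 1)
  else if direction == 7 then (row + 1, column - 1)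
  else (row, column)

-- A's recursion is not structurally terminating on every input (it diverges e.g. when
-- direction is outside 0..7 and currColor is "STAR"), so the port carries fuel; 32 is
-- more than the recursion depth A reaches on any input admitted by Pre_ (≤ 9).
-- Where Python raises IndexError or falls through returning None (both outside Pre_),
-- the port returns 0.
def evalHelperFuel (fuel : Nat) (evalRack : List (List String)) (row column total stars : Int) (currColor initColor oppColor : String) (direction : Int) : Int :=
  match fuel with
  | 0 => 0
  | Nat.succ fuel =>
    if total == 4 && currColor == initColor then 1000
    else
      let cell : Option String := PySem.List.pyGet? ((PySem.List.pyGet? evalRack row).getD []) column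
      if row < 0 || row > 5 || column < 0 || column > 6 || cell == some oppColor || (currColor == "STAR" && cell == some initColor) then
        if stars + total > 3 then total * total else 0
      else
        let currColor := if cell == some "*" then "STAR" else currColor
        if currColor == "STAR" then
          evalHelperFuel fuel evalRack (stepA direction row column).1 (stepA direction row column).2 total (stars + 1) currColor initColor oppColor direction
        else if currColor == initColor then
          evalHelperFuel fuel evalRack (stepA direction row column).1 (stepA direction row column).2 (total + 1) stars currColor initColor oppColor direction
        else 0

def evalHelper (evalRack : List (List String)) (row : Int) (column : Int) (total : Int) (stars : Int) (currColor : String) (initColor : String) (oppColor : String) (direction : Int) : Int :=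
  evalHelperFuel 32 evalRack row column total stars currColor initColor oppColor direction

-- ===== PORT B =====
-- Source B's DELTAS tuple and its guarded lookup.
def pvDeltasB : List (Int × Int) := [(1, 0), (1, 1), (0, 1), (-1, 1), (-1, 0), (-1, -1), (0, -1), (1, -1)]

-- Source B's mutable loop state tuple (row, column, total, stars, curr).
structure PVState where
  row : Int
  column : Int
  total : Int
  stars : Int
  curr : String
deriving Repr, DecidableEq

-- Source B's _step: either the final score (inl) or the next state; `inr none`
-- is the fall-through in which the Python driver returns None (outside Pre_).
def stepB (evalRack : List (List String)) (st : PVState) (initColor oppColor : String) (dr dc : Int) : Int ⊕ Option PVState :=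
  if st.total == 4 && st.curr == initColor then Sum.inl 1000
  else if !(0 ≤ st.row && st.row ≤ 5 && 0 ≤ st.column && st.column ≤ 6)
        || PySem.List.pyGet? ((PySem.List.pyGet? evalRack st.row).getD []) st.column == some oppColor
        || (st.curr == "STAR" && PySem.List.pyGet? ((PySem.List.pyGet? evalRack st.row).getD []) st.column == some initColor) then
    Sum.inl (if st.stars + st.total > 3 then st.total * st.total else 0)
  else
    let curr := if PySem.List.pyGet? ((PySem.List.pyGet? evalRack st.row).getD []) st.column == some "*" then "STAR" else st.curr
    if curr == "STAR" then Sum.inr (some ⟨st.row + dr, st.column + dc, st.total, st.stars + 1, curr⟩)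
    else if curr == initColor then Sum.inr (some ⟨st.row + dr, st.column + dc, st.total + 1, st.stars, curr⟩)
    else Sum.inr none

-- Source B's while-loop driver, with the same fuel convention as A's port (0 where
-- the Python would diverge or return None, both outside Pre_).
def driveB (fuel : Nat) (evalRack : List (List String)) (initColor oppColor : String) (dr dc : Int) (st : PVState) : Int :=
  match fuel with
  | 0 => 0
  | Nat.succ fuel =>
    match stepB evalRack st initColor oppColor dr dc with
    | Sum.inl r => r
    | Sum.inr (some st') => driveB fuel evalRack initColor oppColor dr dc st'
    | Sum.inr none => 0

def evalHelper_alt (evalRack : List (List String)) (row : Int) (column : Int) (total : Int) (stars : Int) (currColor : String) (initColor : String) (oppColor : String) (direction : Int) : Int :=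
  let d := if 0 ≤ direction ∧ direction < 8 then (PySem.List.pyGet? pvDeltasB direction).getD (0, 0) else (0, 0)
  driveB 32 evalRack initColor oppColor d.1 d.2 ⟨row, column, total, stars, currColor⟩

-- ===== PRECONDITION & SPEC =====
-- Pre_ excludes exactly the inputs on which the Python A does not return an int:
-- (a) IndexError — the walk starts in bounds on a rack smaller than the full 6×7 board
--     (we require the full board whenever the start is in bounds, which also excludes a
--     few ragged racks on which A happens to stop before the missing cell);
-- (b) infinite recursion — direction outside 0..7 with no immediate stop (we keep the
--     delayed-stop cases where currColor == initColor and the fixed cell keeps feeding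
--     total up to the 1000-return, for 0 ≤ total ≤ 4);
-- (c) the fall-through `return None` — start in bounds, cell neither oppColor nor '*',
--     and currColor neither "STAR" nor initColor.
def Pre_evalHelper (evalRack : List (List String)) (row : Int) (column : Int) (total : Int) (stars : Int) (currColor : String) (initColor : String) (oppColor : String) (direction : Int) : Prop :=
  let inB := 0 ≤ row ∧ row ≤ 5 ∧ 0 ≤ column ∧ column ≤ 6
  let cell := (evalRack.getD row.toNat []).getD column.toNat ""
  (¬ inB ∨ (6 ≤ evalRack.length ∧ ∀ r ∈ evalRack, 7 ≤ r.length))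
  ∧ ((0 ≤ direction ∧ direction ≤ 7)
     ∨ (total = 4 ∧ currColor = initColor)
     ∨ ¬ inB
     ∨ cell = oppColor
     ∨ (currColor = "STAR" ∧ cell = initColor)
     ∨ (currColor = initColor ∧ currColor ≠ "STAR" ∧ cell ≠ oppColor ∧ cell ≠ "*" ∧ 0 ≤ total ∧ total ≤ 4))
  ∧ ¬ (inB ∧ cell ≠ oppColor ∧ cell ≠ "*" ∧ currColor ≠ "STAR" ∧ currColor ≠ initColor)
instance (evalRack : List (List String)) (row : Int) (column : Int) (total : Int) (stars : Int) (currColor : String) (initColor : String) (oppColor : String) (direction : Int) : Decidable (Pre_evalHelper evalRack row column total stars currColor initColor oppColor direction) := by unfold Pre_evalHelper; infer_instance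

def pvWitness_evalHelper : List (List String) × Int × Int × Int × Int × String × String × String × Int :=
  ([["r", "b", "b", "b", "b", "b", "b"], ["r", "b", "b", "b", "b", "b", "b"], ["r", "b", "b", "b", "b", "b", "b"], ["y", "b", "b", "b", "b", "b", "b"], ["b", "b", "b", "b", "b", "b", "b"], ["b", "b", "b", "b", "b", "b", "b"]], 0, 0, 0, 0, "r", "r", "y", 0)

def Spec_evalHelper (evalRack : List (List String)) (row : Int) (column : Int) (total : Int) (stars : Int) (currColor : String) (initColor : String) (oppColor : String) (direction : Int) (out : Int) : Prop := out = evalHelper_alt evalRack row column total stars currColor initColor oppColor direction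
instance (evalRack : List (List String)) (row : Int) (column : Int) (total : Int) (stars : Int) (currColor : String) (initColor : String) (oppColor : String) (direction : Int) (out : Int) : Decidable (Spec_evalHelper evalRack row column total stars currColor initColor oppColor direction out) := by unfold Spec_evalHelper; infer_instance

-- ===== CLAIM (what is proved, stated in full; the proofs are below) =====
def Claim_equal_evalHelper : Prop := ∀ (evalRack : List (List String)) (row : Int) (column : Int) (total : Int) (stars : Int) (currColor : String) (initColor : String) (oppColor : String) (direction : Int), Dom_evalHelper evalRack row column total stars currColor initColor oppColor direction → Pre_evalHelper evalRack row column total stars currColor initColor oppColor direction → Spec_evalHelper evalRack row column total stars currColor initColor oppColor direction (evalHelper evalRack row column total stars currColor initColor oppColor direction)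

-- ===== LEMMAS AND PROOFS =====
-- B's guarded table lookup, as a named abbreviation for the proofs.
def deltaB (direction : Int) : Int × Int :=
  if 0 ≤ direction ∧ direction < 8 then (PySem.List.pyGet? pvDeltasB direction).getD (0, 0) else (0, 0)

-- A's branch chain moves by exactly the offset B looks up (outside 0..7 both stay put).
theorem stepA_eq_delta (direction row column : Int) :
    stepA direction row column = (row + (deltaB direction).1, column + (deltaB direction).2) := by
  have h : direction = 0 ∨ direction = 1 ∨ direction = 2 ∨ direction = 3 ∨ direction = 4 ∨
      direction = 5 ∨ direction = 6 ∨ direction = 7 ∨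
      (direction ≠ 0 ∧ direction ≠ 1 ∧ direction ≠ 2 ∧ direction ≠ 3 ∧ direction ≠ 4 ∧
       direction ≠ 5 ∧ direction ≠ 6 ∧ direction ≠ 7) := by omega
  rcases h with h | h | h | h | h | h | h | h | ⟨h0, h1, h2, h3, h4, h5, h6, h7⟩
  · subst h; simp [stepA, show deltaB 0 = (1, 0) from by decide]
  · subst h; simp [stepA, show deltaB 1 = (1, 1) from by decide]
  · subst h; simp [stepA, show deltaB 2 = (0, 1) from by decide]
  · subst h; simp [stepA, show deltaB 3 = (-1, 1) from by decide, Prod.ext_iff]; ring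
  · subst h; simp [stepA, show deltaB 4 = (-1, 0) from by decide, Prod.ext_iff]; ring
  · subst h
    simp [stepA, show deltaB 5 = (-1, -1) from by decide, Prod.ext_iff]
    constructor <;> ring
  · subst h; simp [stepA, show deltaB 6 = (0, -1) from by decide, Prod.ext_iff]; ring
  · subst h; simp [stepA, show deltaB 7 = (1, -1) from by decide, Prod.ext_iff]; ring
  · have hd : deltaB direction = (0, 0) := by
      unfold deltaB; rw [if_neg]; omega
    have hne : stepA direction row column = (row, column) := by
      simp [stepA, h0, h1, h2, h3, h4, h5, h6, h7]
    rw [hne, hd]; simp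

-- The fueled recursion of A's port and B's step-driven loop agree fuel-for-fuel.
theorem fuel_eq (fuel : Nat) (evalRack : List (List String)) (row column total stars : Int)
    (currColor initColor oppColor : String) (direction : Int) :
    evalHelperFuel fuel evalRack row column total stars currColor initColor oppColor direction =
      driveB fuel evalRack initColor oppColor (deltaB direction).1 (deltaB direction).2
        ⟨row, column, total, stars, currColor⟩ := by
  induction fuel generalizing row column total stars currColor with
  | zero => rfl
  | succ n ih =>
    have hb : (!(decide (0 ≤ row) && decide (row ≤ 5) && decide (0 ≤ column) && decide (column ≤ 6)) : Bool)
        = (decide (row < 0) || decide (row > 5) || decide (column < 0) || decide (column > 6)) := by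
      simp only [← decide_not, ← Bool.decide_and, ← Bool.decide_or, decide_eq_decide]
      omega
    simp only [evalHelperFuel, driveB, stepB, stepA_eq_delta, hb]
    split_ifs <;> simp_all

-- ===== VERDICT (by name: the statement is the Claim_ definition above) =====
theorem evalHelper_spec : Claim_equal_evalHelper := by
  intro evalRack row column total stars currColor initColor oppColor direction _ _
  unfold Spec_evalHelper evalHelper evalHelper_alt
  exact fuel_eq 32 evalRack row column total stars currColor initColor oppColor direction
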